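-- pv_equiv track=rewrite | github.com/NinjaCoder8/compliance_dashbaord | app.py | default_enrollment_values
-- ===== SOURCE A (Python) =====
-- from typing import Optional, List
--
-- def default_enrollment_values(unique_vals: List[str]) -> List[str]:
--     # Heuristic: preselect values that look like sales/enrollments
--     lowered = {str(v).strip().lower() for v in unique_vals}
--     picks = []
--     keywords = [
--         "sale", "sold", "enroll", "policy", "bind", "conversion",
--         "app", "submit", "submitted", "s_app_submitted"
--     ]
--     for v in unique_vals:
--         vl = str(v).strip().lower()
--         if any(k in vl for k in keywords):
--             picks.append(v)
--     # If nothing matched, return empty (let user pick)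
--     return picks
-- ===== SOURCE B (Python) =====
-- from typing import Optional, List
--
-- # Keyword lookup inverted: instead of searching each keyword inside the string,
-- # slide fixed-size windows over the string and look each window up in a hash set.
-- # "submitted" and "s_app_submitted" are omitted: any string containing them
-- # already contains "submit" / "app".
-- _KEYSET = frozenset(
--     ["sale", "sold", "enroll", "policy", "bind", "conversion", "app", "submit"]
-- )
-- _LENS = sorted({len(k) for k in _KEYSET})  # [3, 4, 6, 10]
--
-- def _hit(s: str) -> bool:
--     return any(
--         s[i:i + L] in _KEYSET
--         for L in _LENS
--         for i in range(len(s) - L + 1)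
--     )
--
-- def default_enrollment_values(unique_vals: List[str]) -> List[str]:
--     return [v for v in unique_vals if _hit(str(v).strip().lower())]
-- ===== Notes on version B (the rewrite author's own statement) =====
-- stated objective: alternative
-- what changed: Inverts the matching loop: instead of searching each of the ten keywords as a substring of the value, B slides windows of the distinct keyword lengths over the normalized value and looks each window up in a frozenset (the two keywords subsumed by shorter ones are dropped); the unused 'lowered' set is removed and the result is a filter comprehension.
import Mathlib
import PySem

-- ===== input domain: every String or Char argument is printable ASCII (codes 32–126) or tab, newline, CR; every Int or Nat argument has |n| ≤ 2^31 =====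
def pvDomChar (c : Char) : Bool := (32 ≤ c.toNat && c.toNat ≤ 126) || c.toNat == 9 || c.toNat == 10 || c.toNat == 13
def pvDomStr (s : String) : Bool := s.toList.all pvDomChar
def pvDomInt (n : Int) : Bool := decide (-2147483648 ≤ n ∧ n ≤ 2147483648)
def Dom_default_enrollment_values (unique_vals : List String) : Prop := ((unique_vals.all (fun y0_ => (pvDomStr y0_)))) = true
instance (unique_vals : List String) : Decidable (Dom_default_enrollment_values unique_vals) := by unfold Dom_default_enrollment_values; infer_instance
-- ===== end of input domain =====

-- B inverts the matching loop: it slides windows of the distinct keyword lengths over the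
-- normalized value and looks each window up in a keyword set, instead of searching each
-- keyword as a substring; same exact return value (alternative decomposition).

-- ===== PORT A =====
def pvKeywordsA : List String :=
  ["sale", "sold", "enroll", "policy", "bind", "conversion",
   "app", "submit", "submitted", "s_app_submitted"]

def default_enrollment_values (unique_vals : List String) : List String :=
  let _lowered := PySem.Set.ofList (unique_vals.map (fun v => PySem.Str.lower (PySem.Str.strip v)))
  unique_vals.foldl (fun picks v =>
    let vl := PySem.Str.lower (PySem.Str.strip v)
    if pvKeywordsA.any (fun k => PySem.Str.isIn k vl) then picks ++ [v] else picks) []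

-- ===== PORT B =====
def pvKeyset : List (List Char) :=
  ["sale".toList, "sold".toList, "enroll".toList, "policy".toList,
   "bind".toList, "conversion".toList, "app".toList, "submit".toList]

def pvLens : List Nat := [3, 4, 6, 10]

-- B's `_hit`: for each keyword length L, slide an L-wide window over s and look it up
-- (`range(len(s) - L + 1)` is empty when L > len(s); so is `List.range (s.length + 1 - L)`)
def pvHit (s : List Char) : Bool :=
  pvLens.any (fun L =>
    (List.range (s.length + 1 - L)).any (fun i => pvKeyset.contains ((s.drop i).take L)))

def default_enrollment_values_alt (unique_vals : List String) : List String :=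
  unique_vals.filter (fun v => pvHit (PySem.Str.lower (PySem.Str.strip v)).toList)

-- ===== PRECONDITION & SPEC =====
def Spec_default_enrollment_values (unique_vals : List String) (out : List String) : Prop := out = default_enrollment_values_alt unique_vals
instance (unique_vals : List String) (out : List String) : Decidable (Spec_default_enrollment_values unique_vals out) := by unfold Spec_default_enrollment_values; infer_instance

-- ===== CLAIM =====
def Claim_equal_default_enrollment_values : Prop := ∀ (unique_vals : List String), Dom_default_enrollment_values unique_vals → Spec_default_enrollment_values unique_vals (default_enrollment_values unique_vals)

-- ===== LEMMAS AND PROOFS =====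

-- a list is an infix of s exactly when it is some window of its own length
theorem infix_iff_window (k s : List Char) :
    k <:+: s ↔ ∃ i < s.length + 1 - k.length, (s.drop i).take k.length = k := by
  constructor
  · rintro ⟨pre, suf, rfl⟩
    refine ⟨pre.length, by simp; omega, ?_⟩
    simp
  · rintro ⟨i, _, heq⟩
    exact heq ▸ (((s.drop i).take_prefix k.length).isInfix.trans (s.drop_suffix i).isInfix)

-- B's window scan finds exactly the strings with a keyword of B's set as an infix
theorem pvHit_iff (s : List Char) :
    pvHit s = true ↔ ∃ k ∈ pvKeyset, k <:+: s := by
  simp only [pvHit, List.any_eq_true, List.mem_range, List.contains_iff_mem]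
  constructor
  · rintro ⟨L, _, i, _, hk⟩
    exact ⟨(s.drop i).take L, hk,
      ((s.drop i).take_prefix L).isInfix.trans (s.drop_suffix i).isInfix⟩
  · rintro ⟨k, hk, hi⟩
    rcases (infix_iff_window k s).1 hi with ⟨i, hilt, heq⟩
    refine ⟨k.length, ?_, i, hilt, by rw [heq]; exact hk⟩
    simp only [pvKeyset, List.mem_cons, List.not_mem_nil, or_false] at hk
    rcases hk with rfl | rfl | rfl | rfl | rfl | rfl | rfl | rfl <;> decide

-- A's ten keywords match exactly when B's eight do: "submitted" and "s_app_submitted"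
-- are subsumed by "submit" and "app"
theorem keywords_equiv (s : List Char) :
    (∃ k ∈ pvKeywordsA, k.toList <:+: s) ↔ ∃ k ∈ pvKeyset, k <:+: s := by
  constructor
  · rintro ⟨k, hk, hi⟩
    simp only [pvKeywordsA, List.mem_cons, List.not_mem_nil, or_false] at hk
    rcases hk with rfl | rfl | rfl | rfl | rfl | rfl | rfl | rfl | rfl | rfl
    · exact ⟨"sale".toList, by decide, hi⟩
    · exact ⟨"sold".toList, by decide, hi⟩
    · exact ⟨"enroll".toList, by decide, hi⟩
    · exact ⟨"policy".toList, by decide, hi⟩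
    · exact ⟨"bind".toList, by decide, hi⟩
    · exact ⟨"conversion".toList, by decide, hi⟩
    · exact ⟨"app".toList, by decide, hi⟩
    · exact ⟨"submit".toList, by decide, hi⟩
    · exact ⟨"submit".toList, by decide,
        (show "submit".toList <:+: "submitted".toList by decide).trans hi⟩
    · exact ⟨"app".toList, by decide,
        (show "app".toList <:+: "s_app_submitted".toList by decide).trans hi⟩
  · rintro ⟨k, hk, hi⟩
    simp only [pvKeyset, List.mem_cons, List.not_mem_nil, or_false] at hk
    rcases hk with rfl | rfl | rfl | rfl | rfl | rfl | rfl | rfl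
    · exact ⟨"sale", by decide, hi⟩
    · exact ⟨"sold", by decide, hi⟩
    · exact ⟨"enroll", by decide, hi⟩
    · exact ⟨"policy", by decide, hi⟩
    · exact ⟨"bind", by decide, hi⟩
    · exact ⟨"conversion", by decide, hi⟩
    · exact ⟨"app", by decide, hi⟩
    · exact ⟨"submit", by decide, hi⟩

-- the two per-value tests coincide
theorem test_eq (vl : String) :
    pvKeywordsA.any (fun k => PySem.Str.isIn k vl) = pvHit vl.toList := by
  rw [Bool.eq_iff_iff]
  simp only [List.any_eq_true, PySem.Str.isIn_eq, PySem.Chars.isIn_iff_infix]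
  rw [pvHit_iff]
  exact keywords_equiv vl.toList

-- ===== VERDICT =====
theorem default_enrollment_values_spec : Claim_equal_default_enrollment_values := by
  intro unique_vals _
  unfold Spec_default_enrollment_values default_enrollment_values default_enrollment_values_alt
  rw [PySem.List.foldl_append_if_eq_filter, List.nil_append]
  exact List.filter_congr (fun v _ => test_eq _)
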